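-- pv_equiv track=rewrite | github.com/Wulfic/Cicada3301 | tools/deep_brute_force.py | columnar_untranspose
-- ===== SOURCE A (Python) =====
-- def columnar_untranspose(text, width):
--     if width <= 0 or width >= len(text):
--         return text
--     n = len(text)
--     full_rows = n // width
--     remainder = n % width
--     result = [''] * n
--     pos = 0
--     for col in range(width):
--         col_len = full_rows + (1 if col < remainder else 0)
--         for row in range(col_len):
--             result[row * width + col] = text[pos]
--             pos += 1
--     return ''.join(result)
-- ===== SOURCE B (Python) =====
-- def columnar_untranspose(text, width):
--     if width <= 0 or width >= len(text):
--         return text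
--     n = len(text)
--     full_rows, remainder = divmod(n, width)
--
--     def src(i):
--         row, col = divmod(i, width)
--         return col * full_rows + min(col, remainder) + row
--
--     return ''.join(text[src(i)] for i in range(n))
-- ===== Notes on version B (the rewrite author's own statement) =====
-- stated objective: simpler
-- what changed: Instead of scattering the input sequentially into index-computed slots of a mutable result list via two nested loops, B gathers: for each output position i it computes the source index in closed form (column start = col*full_rows + min(col, remainder), plus the row) and joins the characters in one pass with no mutation.
import Mathlib
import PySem

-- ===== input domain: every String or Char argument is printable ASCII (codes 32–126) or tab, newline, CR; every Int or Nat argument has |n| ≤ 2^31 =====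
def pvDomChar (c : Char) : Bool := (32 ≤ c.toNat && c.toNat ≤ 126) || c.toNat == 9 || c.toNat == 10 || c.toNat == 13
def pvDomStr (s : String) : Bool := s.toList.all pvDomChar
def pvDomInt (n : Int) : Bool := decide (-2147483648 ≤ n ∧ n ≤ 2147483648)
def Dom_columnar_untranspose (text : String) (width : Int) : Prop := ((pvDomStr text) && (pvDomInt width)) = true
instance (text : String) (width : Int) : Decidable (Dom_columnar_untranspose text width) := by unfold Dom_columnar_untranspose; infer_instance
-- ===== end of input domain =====

-- B gathers each output character by a closed-form source index instead of A's scatter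
-- into a mutable list via nested loops (objective: simpler; return value only).

-- ===== PORT A =====
-- Python's result list of ''/1-char strings is List (List Char); every text[pos] and
-- result[...] index is in range on the taken branch, so pyGet?/set are exact here.
def columnar_untranspose (text : String) (width : Int) : String :=
  if width ≤ 0 || (text.toList.length : Int) ≤ width then text
  else
    let cs := text.toList
    let n : Int := cs.length
    let full_rows := PySem.Int.floordiv n width
    let remainder := PySem.Int.mod n width
    let result : List (List Char) := List.replicate cs.length []
    let st := (PySem.List.pyRange 0 width).foldl
      (fun (st : List (List Char) × Int) col =>
        let col_len := full_rows + (if col < remainder then (1:Int) else 0)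
        (PySem.List.pyRange 0 col_len).foldl
          (fun (st2 : List (List Char) × Int) row =>
            (st2.1.set (row * width + col).toNat (PySem.List.pyGet? cs st2.2).toList, st2.2 + 1))
          st)
      (result, 0)
    String.ofList (PySem.Chars.join [] st.1)

-- ===== PORT B =====
def columnar_untranspose_alt (text : String) (width : Int) : String :=
  if width ≤ 0 || (text.toList.length : Int) ≤ width then text
  else
    let cs := text.toList
    let n : Int := cs.length
    let full_rows := PySem.Int.floordiv n width
    let remainder := PySem.Int.mod n width
    String.ofList ((PySem.List.pyRange 0 n).map (fun i =>
      let row := PySem.Int.floordiv i width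
      let col := PySem.Int.mod i width
      (PySem.List.pyGet? cs (col * full_rows + min col remainder + row)).toList)).flatten

-- ===== PRECONDITION & SPEC =====
def Spec_columnar_untranspose (text : String) (width : Int) (out : String) : Prop := out = columnar_untranspose_alt text width
instance (text : String) (width : Int) (out : String) : Decidable (Spec_columnar_untranspose text width out) := by unfold Spec_columnar_untranspose; infer_instance

-- ===== CLAIM (what is proved, stated in full; the proofs are below) =====
def Claim_equal_columnar_untranspose : Prop := ∀ (text : String) (width : Int), Dom_columnar_untranspose text width → Spec_columnar_untranspose text width (columnar_untranspose text width)

-- ===== LEMMAS AND PROOFS =====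

-- Start offset of column c, its length, and the source character landing at output slot i.
def cuStart (fr rem c : Nat) : Nat := c * fr + min c rem
def cuLen (fr rem c : Nat) : Nat := fr + (if c < rem then 1 else 0)
def cuEntry (cs : List Char) (W fr rem i : Nat) : List Char :=
  (cs[cuStart fr rem (i % W) + i / W]?).toList

theorem cuStart_zero (fr rem : Nat) : cuStart fr rem 0 = 0 := by
  simp [cuStart]

theorem cuStart_succ (fr rem c : Nat) : cuStart fr rem (c + 1) = cuStart fr rem c + cuLen fr rem c := by
  unfold cuStart cuLen
  have h1 : (c + 1) * fr = c * fr + fr := by ring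
  split_ifs with h <;> omega

theorem cuDiv_lt (N W c i : Nat) (_hW0 : 0 < W) (hi : i < N) (hm : i % W = c) :
    i / W < cuLen (N / W) (N % W) c := by
  have hdm : W * (N / W) + N % W = N := Nat.div_add_mod N W
  have hdm' : W * (i / W) + i % W = i := Nat.div_add_mod i W
  unfold cuLen
  split_ifs with h
  · have : i / W ≤ N / W := Nat.div_le_div_right (by omega)
    omega
  · by_contra hge
    have h1 : N / W ≤ i / W := by omega
    have : W * (N / W) ≤ W * (i / W) := Nat.mul_le_mul_left _ h1
    omega

set_option maxRecDepth 4096 in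
theorem set_map_range {α : Type} (n j : Nat) (F : Nat → α) (v : α) :
    ((List.range n).map F).set j v = (List.range n).map (fun i => if i = j then v else F i) := by
  apply List.ext_getElem
  · simp
  · intro i hi hi'
    simp only [List.getElem_set, List.getElem_map, List.getElem_range]
    rcases eq_or_ne i j with h | h
    · simp [h]
    · simp [h, Ne.symm h]

theorem join_nil_flatten (parts : List (List Char)) : PySem.Chars.join [] parts = parts.flatten := by
  simp only [PySem.Chars.join, List.intercalate]
  induction parts with
  | nil => simp
  | cons h t ih => cases t <;> simp_all [List.intersperse]

-- A's inner loop over one column c: writes cs[start c + row] into output slot row*W + c.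
theorem cuA_inner (cs : List Char) (W c : Nat) (hW0 : 0 < W) (hc : c < W) (F : Nat → List Char) :
    ∀ r, r ≤ cuLen (cs.length / W) (cs.length % W) c →
    (List.range r).foldl
      (fun (st2 : List (List Char) × Int) (rowN : Nat) =>
        (st2.1.set (((0:Int) + rowN) * W + ((0:Int) + c)).toNat (PySem.List.pyGet? cs st2.2).toList,
         st2.2 + 1))
      ((List.range cs.length).map F, (cuStart (cs.length / W) (cs.length % W) c : Nat))
    = ((List.range cs.length).map (fun i =>
         if i % W = c ∧ i / W < r then cuEntry cs W (cs.length / W) (cs.length % W) i else F i),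
       ((cuStart (cs.length / W) (cs.length % W) c + r : Nat) : Int)) := by
  intro r
  induction r with
  | zero =>
    intro _
    simp
  | succ r ih =>
    intro hr
    rw [List.range_succ, List.foldl_append, ih (by omega)]
    simp only [List.foldl_cons, List.foldl_nil]
    have hpg : ∀ m : Nat, PySem.List.pyGet? cs ((m : Nat) : Int) = cs[m]? := by
      intro m; simp [pysem]
    have hidx : ((((0:Int) + r) * W + ((0:Int) + c)).toNat) = r * W + c := by
      rw [show ((0:Int) + r) * W + ((0:Int) + c) = ((r * W + c : Nat) : Int) by push_cast; ring,
        Int.toNat_natCast]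
    rw [hidx, hpg, set_map_range, Prod.mk.injEq]
    constructor
    · apply List.map_congr_left
      intro i hi
      simp only [List.mem_range] at hi
      by_cases he : i = r * W + c
      · subst he
        have hmod : (r * W + c) % W = c := by
          rw [Nat.mul_comm, Nat.mul_add_mod]
          exact Nat.mod_eq_of_lt hc
        have hdiv : (r * W + c) / W = r := by
          rw [Nat.mul_comm, Nat.mul_add_div hW0, Nat.div_eq_of_lt hc]
          omega
        simp [hmod, hdiv, cuEntry]
      · have hdm : W * (i / W) + i % W = i := Nat.div_add_mod i W
        simp only [if_neg he]
        by_cases hm : i % W = c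
        · by_cases hd : i / W < r
          · simp [hm, hd, Nat.lt_succ_of_lt hd]
          · have hd1 : i / W ≠ r := by
              intro h5
              apply he
              rw [h5] at hdm
              have hcomm : W * r = r * W := Nat.mul_comm W r
              omega
            have hd2 : ¬ (i / W < r + 1) := by omega
            simp [hm, hd, hd2]
        · simp [hm]
    · push_cast; ring

-- A's outer loop over columns 0..c-1.
theorem cuA_outer (cs : List Char) (W : Nat) (hW0 : 0 < W) (_hWN : W < cs.length) :
    ∀ c, c ≤ W →
    (List.range c).foldl
      (fun (st : List (List Char) × Int) (colN : Nat) =>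
        (PySem.List.pyRange 0
            (((cs.length / W : Nat) : Int) +
              if (0:Int) + colN < ((cs.length % W : Nat) : Int) then 1 else 0)).foldl
          (fun (st2 : List (List Char) × Int) row =>
            (st2.1.set (row * W + ((0:Int) + colN)).toNat (PySem.List.pyGet? cs st2.2).toList,
             st2.2 + 1))
          st)
      (List.replicate cs.length [], 0)
    = ((List.range cs.length).map (fun i =>
         if i % W < c then cuEntry cs W (cs.length / W) (cs.length % W) i else []),
       ((cuStart (cs.length / W) (cs.length % W) c : Nat) : Int)) := by
  intro c
  induction c with
  | zero =>
    intro _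
    rw [List.range_zero, List.foldl_nil, Prod.mk.injEq]
    constructor
    · rw [List.map_congr_left (g := fun _ => ([] : List Char)) (by intro a _; simp)]
      simp [List.map_const']
    · simp [cuStart_zero]
  | succ c ih =>
    intro hc
    rw [List.range_succ, List.foldl_append, ih (by omega)]
    simp only [List.foldl_cons, List.foldl_nil]
    have hlen : (((cs.length / W : Nat) : Int) +
          if (0:Int) + c < ((cs.length % W : Nat) : Int) then 1 else 0)
        = ((cuLen (cs.length / W) (cs.length % W) c : Nat) : Int) := by
      unfold cuLen
      split_ifs with h1 h2 h2 <;> push_cast <;> omega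
    rw [hlen, PySem.List.pyRange_one]
    simp only [Int.sub_zero, Int.toNat_natCast]
    rw [List.foldl_map,
      cuA_inner cs W c hW0 (by omega) _ (cuLen (cs.length / W) (cs.length % W) c) le_rfl,
      Prod.mk.injEq]
    constructor
    · apply List.map_congr_left
      intro i hi
      simp only [List.mem_range] at hi
      by_cases hm : i % W = c
      · have hd : i / W < cuLen (cs.length / W) (cs.length % W) c :=
          cuDiv_lt cs.length W c i hW0 hi hm
        simp [hm, hd]
      · by_cases hlt : i % W < c
        · simp [hm, hlt, Nat.lt_succ_of_lt hlt]
        · have h2 : ¬ (i % W < c + 1) := by omega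
          simp [hm, hlt, h2]
    · rw [cuStart_succ]

-- ===== VERDICT (by name: the statement is the Claim_ definition above) =====
theorem columnar_untranspose_spec : Claim_equal_columnar_untranspose := by
  intro text width _
  unfold Spec_columnar_untranspose columnar_untranspose columnar_untranspose_alt
  split_ifs with hg
  · rfl
  · simp only [Bool.or_eq_true, decide_eq_true_eq, not_or] at hg
    obtain ⟨hw0, hwn⟩ := hg
    set cs := text.toList with hcs
    have hwidth : width = ((width.toNat : Nat) : Int) := by omega
    set W := width.toNat with hWdef
    have hWpos : 0 < W := by omega
    have hWN : W < cs.length := by omega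
    rw [hwidth]
    simp only [PySem.Int.floordiv_natCast, PySem.Int.mod_natCast]
    congr 1
    rw [PySem.List.pyRange_one 0 (W : Int), PySem.List.pyRange_one 0 (cs.length : Int)]
    simp only [Int.sub_zero, Int.toNat_natCast]
    rw [List.foldl_map, cuA_outer cs W hWpos hWN W le_rfl, join_nil_flatten, List.map_map]
    congr 1
    apply List.map_congr_left
    intro i hi
    simp only [List.mem_range] at hi
    have hmlt : i % W < W := Nat.mod_lt _ hWpos
    simp only [if_pos hmlt, Function.comp]
    have e1 : PySem.Int.floordiv ((0:Int) + (i : Nat)) ((W : Nat) : Int) = ((i / W : Nat) : Int) := by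
      rw [zero_add]; exact PySem.Int.floordiv_natCast i W
    have e2 : PySem.Int.mod ((0:Int) + (i : Nat)) ((W : Nat) : Int) = ((i % W : Nat) : Int) := by
      rw [zero_add]; exact PySem.Int.mod_natCast i W
    simp only [e1, e2]
    rw [← Nat.cast_min, ← Nat.cast_mul, ← Nat.cast_add, ← Nat.cast_add]
    have hpg : ∀ m : Nat, PySem.List.pyGet? cs ((m : Nat) : Int) = cs[m]? := by
      intro m; simp [pysem]
    rw [hpg]
    unfold cuEntry cuStart
    rfl
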